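-- pv_equiv track=rewrite | github.com/logic-and-learning/AdvisoRL | src/reward_machines/reward_machine_utils.py | _get_matching_between_sets
-- ===== SOURCE A (Python) =====
-- def _get_matching_between_sets(D1,D2):
--     # base case
--     if len(D1) == 0:
--         return [[]]
--     # recursion
--     ret = []
--     for i in range(len(D1)):
--         for j in range(len(D2)):
--             for o in _get_matching_between_sets(D1[0:i] + D1[i+1:],D2[0:j] + D2[j+1:]):
--                 ret.append([(D1[i],D2[j])] + o)
--     return ret
-- ===== SOURCE B (Python) =====
-- def _get_matching_between_sets(D1, D2):
--     # No complete matching of D1 exists if D2 has fewer elements.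
--     if len(D1) > len(D2):
--         return []
--     # Iterative level-by-level expansion: every output has depth len(D1), so
--     # breadth-first level order equals A's depth-first emission order.
--     states = [(list(D1), list(D2), [])]
--     for _ in range(len(D1)):
--         nxt = []
--         for d1, d2, pre in states:
--             for i in range(len(d1)):
--                 for j in range(len(d2)):
--                     nxt.append((d1[0:i] + d1[i+1:], d2[0:j] + d2[j+1:],
--                                 pre + [(d1[i], d2[j])]))
--         states = nxt
--     return [pre for _, _, pre in states]
-- ===== Notes on version B (the rewrite author's own statement) =====
-- stated objective: alternative
-- what changed: Replaces A's recursive enumeration with an iterative level-by-level (breadth-first) expansion of partial matchings kept in an explicit state list; since every complete matching sits at depth len(D1), the level order reproduces A's emission order exactly.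
import Mathlib
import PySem

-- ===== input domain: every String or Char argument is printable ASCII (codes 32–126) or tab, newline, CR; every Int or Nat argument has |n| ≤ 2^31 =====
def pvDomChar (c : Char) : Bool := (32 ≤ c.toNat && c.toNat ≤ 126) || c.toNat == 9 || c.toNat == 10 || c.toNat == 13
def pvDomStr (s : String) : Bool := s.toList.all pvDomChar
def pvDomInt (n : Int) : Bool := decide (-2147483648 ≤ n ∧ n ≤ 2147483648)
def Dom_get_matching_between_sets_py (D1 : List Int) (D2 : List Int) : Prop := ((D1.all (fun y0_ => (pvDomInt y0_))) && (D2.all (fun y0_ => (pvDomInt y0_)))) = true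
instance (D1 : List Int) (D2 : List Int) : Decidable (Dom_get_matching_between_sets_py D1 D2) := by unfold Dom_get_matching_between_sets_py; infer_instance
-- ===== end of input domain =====

-- B replaces A's recursion by an iterative level-by-level expansion of partial matchings
-- (objective: alternative decomposition, same output list in the same order).

-- ===== PORT A =====
-- Literal port of A's recursion; the Nat fuel only makes the recursion structural
-- (the entry point calls it with fuel = D1.length and each recursive call removes one
-- element of D1, so the fuel-0 branch is never reached there).
def goA : Nat → List Int → List Int → List (List (Int × Int))
  | _, [], _ => [[]]                                   -- if len(D1) == 0: return [[]]
  | 0, _ :: _, _ => []                                 -- fuel guard (unreachable from the entry point)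
  | fuel + 1, x :: xs, D2 =>
    (PySem.List.pyRange 0 (((x :: xs).length : Int)) 1).foldl (fun ret i =>
      (PySem.List.pyRange 0 ((D2.length : Int)) 1).foldl (fun ret j =>
        (goA fuel
            (PySem.List.slice (x :: xs) (some 0) (some i) ++ PySem.List.slice (x :: xs) (some (i + 1)) none)
            (PySem.List.slice D2 (some 0) (some j) ++ PySem.List.slice D2 (some (j + 1)) none)).foldl
          (fun ret o => ret ++ [[(PySem.List.pyGetD (x :: xs) i 0, PySem.List.pyGetD D2 j 0)] ++ o]) ret) ret) []

def get_matching_between_sets_py (D1 : List Int) (D2 : List Int) : List (List (Int × Int)) :=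
  goA D1.length D1 D2

-- ===== PORT B =====
-- one level of expansion: the body of B's outer 'for _ in range(len(D1))' loop
def stepB (states : List (List Int × List Int × List (Int × Int))) :
    List (List Int × List Int × List (Int × Int)) :=
  states.foldl (fun nxt s =>
    (PySem.List.pyRange 0 ((s.1.length : Int)) 1).foldl (fun nxt i =>
      (PySem.List.pyRange 0 ((s.2.1.length : Int)) 1).foldl (fun nxt j =>
        nxt ++ [(PySem.List.slice s.1 (some 0) (some i) ++ PySem.List.slice s.1 (some (i + 1)) none,
                 PySem.List.slice s.2.1 (some 0) (some j) ++ PySem.List.slice s.2.1 (some (j + 1)) none,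
                 s.2.2 ++ [(PySem.List.pyGetD s.1 i 0, PySem.List.pyGetD s.2.1 j 0)])]) nxt) nxt) []

def get_matching_between_sets_py_alt (D1 : List Int) (D2 : List Int) : List (List (Int × Int)) :=
  if D1.length > D2.length then []           -- no matching can cover D1
  else
  ((PySem.List.pyRange 0 ((D1.length : Int)) 1).foldl (fun states _ => stepB states)
      [(D1, D2, [])]).map (fun s => s.2.2)

-- ===== PRECONDITION & SPEC =====
def Spec_get_matching_between_sets_py (D1 : List Int) (D2 : List Int) (out : List (List (Int × Int))) : Prop := out = get_matching_between_sets_py_alt D1 D2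
instance (D1 : List Int) (D2 : List Int) (out : List (List (Int × Int))) : Decidable (Spec_get_matching_between_sets_py D1 D2 out) := by unfold Spec_get_matching_between_sets_py; infer_instance

-- ===== CLAIM (what is proved, stated in full; the proofs are below) =====
def Claim_equal_get_matching_between_sets_py : Prop := ∀ (D1 : List Int) (D2 : List Int), Dom_get_matching_between_sets_py D1 D2 → Spec_get_matching_between_sets_py D1 D2 (get_matching_between_sets_py D1 D2)

-- ===== LEMMAS AND PROOFS =====

-- shorthand for 'D[0:i] + D[i+1:]' (proof-side only; the ports write it out)
def pvEra (D : List Int) (i : Int) : List Int :=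
  PySem.List.slice D (some 0) (some i) ++ PySem.List.slice D (some (i + 1)) none

lemma pvEra_length (D : List Int) (i : Int) (h0 : 0 ≤ i) (h1 : i < (D.length : Int)) :
    (pvEra D i).length = D.length - 1 := by
  unfold pvEra
  rw [PySem.List.slice_zero_start, PySem.List.slice_to D h0,
      PySem.List.slice_from D (show (0:Int) ≤ i + 1 by omega)]
  simp [List.length_take, List.length_drop]
  omega

lemma goA_succ (fuel : Nat) (x : Int) (xs D2 : List Int) :
    goA (fuel + 1) (x :: xs) D2 =
      (PySem.List.pyRange 0 (((x :: xs).length : Int)) 1).flatMap (fun i =>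
        (PySem.List.pyRange 0 ((D2.length : Int)) 1).flatMap (fun j =>
          (goA fuel (pvEra (x :: xs) i) (pvEra D2 j)).map
            (fun o => (PySem.List.pyGetD (x :: xs) i 0, PySem.List.pyGetD D2 j 0) :: o))) := by
  simp only [goA, pvEra, PySem.List.foldl_append_singleton_eq_map,
    PySem.List.foldl_append_eq_flatMap, List.singleton_append, List.nil_append]

lemma stepB_eq (S : List (List Int × List Int × List (Int × Int))) :
    stepB S = S.flatMap (fun s =>
      (PySem.List.pyRange 0 ((s.1.length : Int)) 1).flatMap (fun i =>
        (PySem.List.pyRange 0 ((s.2.1.length : Int)) 1).map (fun j =>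
          (pvEra s.1 i, pvEra s.2.1 j,
           s.2.2 ++ [(PySem.List.pyGetD s.1 i 0, PySem.List.pyGetD s.2.1 j 0)])))) := by
  simp only [stepB, pvEra, PySem.List.foldl_append_singleton_eq_map,
    PySem.List.foldl_append_eq_flatMap, List.nil_append, List.map_eq_flatMap]

lemma bfs (n : Nat) :
    ∀ (S : List (List Int × List Int × List (Int × Int))),
      (∀ f ∈ S, f.1.length = n) →
      ((stepB^[n]) S).map (fun f => f.2.2) =
        S.flatMap (fun f => (goA n f.1 f.2.1).map (fun o => f.2.2 ++ o)) := by
  induction n with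
  | zero =>
    intro S hS
    have h : S.flatMap (fun f => (goA 0 f.1 f.2.1).map (fun o => f.2.2 ++ o)) =
        S.flatMap (fun f => [f.2.2]) := by
      apply List.flatMap_congr
      intro f hf
      have h0 : f.1 = [] := List.length_eq_zero_iff.mp (hS f hf)
      simp [goA, h0]
    rw [Function.iterate_zero, id, h, ← List.map_eq_flatMap]
  | succ n ih =>
    intro S hS
    have hchild : ∀ f ∈ stepB S, f.1.length = n := by
      intro f hf
      rw [stepB_eq] at hf
      simp only [List.mem_flatMap, List.mem_map] at hf
      obtain ⟨s, hs, i, hi, j, hj, hf⟩ := hf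
      obtain ⟨hi0, hi1⟩ := PySem.List.mem_pyRange_one.mp hi
      subst hf
      have := pvEra_length s.1 i hi0 hi1
      simp only at this ⊢
      rw [this, hS s hs]
      omega
    rw [Function.iterate_succ_apply, ih (stepB S) hchild, stepB_eq, List.flatMap_assoc]
    apply List.flatMap_congr
    intro f hf
    obtain ⟨x, xs, hfx⟩ : ∃ x xs, f.1 = x :: xs := by
      cases h : f.1 with
      | nil => exact absurd (h ▸ hS f hf) (by simp)
      | cons a l => exact ⟨a, l, rfl⟩
    rw [hfx, goA_succ, List.map_flatMap, List.flatMap_assoc]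
    apply List.flatMap_congr
    intro i _
    rw [List.flatMap_map, List.map_flatMap]
    apply List.flatMap_congr
    intro j _
    simp [List.map_map, Function.comp_def]

-- A returns [] whenever D2 is shorter than D1 (the recursion bottoms out with an empty j-loop)
lemma goA_nil (n : Nat) :
    ∀ (d1 d2 : List Int), d1.length = n → d2.length < n → goA n d1 d2 = [] := by
  induction n with
  | zero => intro d1 d2 _ h2; omega
  | succ n ih =>
    intro d1 d2 h1 h2
    obtain ⟨x, xs, hfx⟩ : ∃ x xs, d1 = x :: xs := by
      cases d1 with
      | nil => simp at h1
      | cons a l => exact ⟨a, l, rfl⟩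
    subst hfx
    rw [goA_succ]
    have h : ∀ i ∈ PySem.List.pyRange 0 (((x :: xs).length : Int)) 1,
        (PySem.List.pyRange 0 ((d2.length : Int)) 1).flatMap (fun j =>
          (goA n (pvEra (x :: xs) i) (pvEra d2 j)).map
            (fun o => (PySem.List.pyGetD (x :: xs) i 0, PySem.List.pyGetD d2 j 0) :: o)) = ([] : List (List (Int × Int))) := by
      intro i hi
      obtain ⟨hi0, hi1⟩ := PySem.List.mem_pyRange_one.mp hi
      have h' : ∀ j ∈ PySem.List.pyRange 0 ((d2.length : Int)) 1,
          (goA n (pvEra (x :: xs) i) (pvEra d2 j)).map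
            (fun o => (PySem.List.pyGetD (x :: xs) i 0, PySem.List.pyGetD d2 j 0) :: o) = ([] : List (List (Int × Int))) := by
        intro j hj
        obtain ⟨hj0, hj1⟩ := PySem.List.mem_pyRange_one.mp hj
        rw [ih (pvEra (x :: xs) i) (pvEra d2 j)
              (by rw [pvEra_length _ _ hi0 hi1]; simp at h1 ⊢; omega)
              (by rw [pvEra_length _ _ hj0 hj1]; omega)]
        rfl
      rw [List.flatMap_congr h']
      simp
    rw [List.flatMap_congr h]
    simp

lemma foldl_const_iterate {α β : Type} (g : α → α) :
    ∀ (l : List β) (init : α), l.foldl (fun s _ => g s) init = (g^[l.length]) init := by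
  intro l
  induction l with
  | nil => intro init; rfl
  | cons a l ih =>
    intro init
    simp [List.foldl_cons, ih, Function.iterate_succ_apply]

-- ===== VERDICT (by name: the statement is the Claim_ definition above) =====
theorem get_matching_between_sets_py_spec : Claim_equal_get_matching_between_sets_py := by
  intro D1 D2 _
  unfold Spec_get_matching_between_sets_py get_matching_between_sets_py get_matching_between_sets_py_alt
  by_cases h : D1.length > D2.length
  · rw [if_pos h, goA_nil D1.length D1 D2 rfl h]
  · rw [if_neg h, foldl_const_iterate, PySem.List.length_pyRange_one]
    have hlen : ((D1.length : Int) - 0).toNat = D1.length := by omega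
    rw [hlen, bfs D1.length [(D1, D2, [])] (by simp)]
    simp
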